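-- pv_equiv track=rewrite | github.com/AlSimons/us_tracker | load_database.py | fix_inconsistent_levels
-- ===== SOURCE A (Python) =====
-- def fix_inconsistent_levels(fields):
--     # The column headers in the daily report files are not completely
--     # uniform, but close enough that we can figure out which ones to
--     # use.  Initially, levels is ['Country', 'State', 'Admin2']. We
--     # fix it here.
--     levels = ['Country', 'State', 'Admin2']
--     for n in range(len(levels)):
--         found = False
--         for field in fields:
--             if levels[n] in field:
--                 levels[n] = field
--                 found = True
--                 break
--         if not found:
--             # Need to find Country and State. Admin2 is optional.
--             # Very early files don't have it.
--             if n != 2: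
--                 raise ValueError(
--                     "Couldn't find required location column header {} in {}".
--                         format(levels[n], fields))
--             else:
--                 levels[n] = None  # No Admin2 this file.
--     return levels
-- ===== SOURCE B (Python) =====
-- def fix_inconsistent_levels(fields):
--     # Single pass over fields filling three keyword slots, instead of one
--     # scan of fields per keyword.
--     slots = {'Country': None, 'State': None, 'Admin2': None}
--     for field in fields:
--         for kw in slots:
--             if slots[kw] is None and kw in field:
--                 slots[kw] = field
--     for kw in ('Country', 'State'):
--         if slots[kw] is None:
--             raise ValueError(
--                 "Couldn't find required location column header {} in {}".
--                     format(kw, fields))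
--     return [slots['Country'], slots['State'], slots['Admin2']]
-- ===== Notes on version B (the rewrite author's own statement) =====
-- stated objective: alternative
-- what changed: A scans the whole fields list once per keyword (keyword-outer loop with break); B makes a single pass over fields filling a three-slot keyword map and assembles/validates the result afterwards.
import Mathlib
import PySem

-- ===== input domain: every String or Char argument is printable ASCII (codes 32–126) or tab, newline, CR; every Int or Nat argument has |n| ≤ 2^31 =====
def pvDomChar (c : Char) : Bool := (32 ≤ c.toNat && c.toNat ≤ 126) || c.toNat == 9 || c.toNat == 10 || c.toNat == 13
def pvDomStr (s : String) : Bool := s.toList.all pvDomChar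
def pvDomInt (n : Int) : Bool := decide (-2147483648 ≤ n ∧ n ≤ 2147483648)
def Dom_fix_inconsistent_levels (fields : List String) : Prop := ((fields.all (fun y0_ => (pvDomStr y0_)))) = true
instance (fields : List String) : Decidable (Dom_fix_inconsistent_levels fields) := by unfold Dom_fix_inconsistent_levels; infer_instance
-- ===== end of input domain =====

-- B fills all three keyword slots in ONE pass over fields instead of A's one
-- scan of fields per keyword (alternative decomposition; same result).
-- A raises ValueError when no field contains 'Country' or none contains 'State';
-- Pre_ excludes exactly those inputs (B raises there too).


-- ===== PORT A =====
-- inner loop of A: scan fields, return the first field containing kw ('break')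
def pvScanA (kw : String) (fields : List String) : Option String :=
  match fields with
  | [] => none
  | f :: rest => if PySem.Str.isIn kw f then some f else pvScanA kw rest

-- outer loop over n = 0,1,2: levels[n] := first matching field; if not found,
-- for n ≠ 2 Python raises ValueError (excluded by Pre_), for n = 2 it stores None
def fix_inconsistent_levels (fields : List String) : List (Option String) :=
  [pvScanA "Country" fields, pvScanA "State" fields, pvScanA "Admin2" fields]

-- ===== PORT B =====
-- one fold over fields; each slot keeps its value once filled
def pvStepB (s : Option String × Option String × Option String) (f : String) :
    Option String × Option String × Option String :=
  ((if s.1.isNone && PySem.Str.isIn "Country" f then some f else s.1),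
   (if s.2.1.isNone && PySem.Str.isIn "State" f then some f else s.2.1),
   (if s.2.2.isNone && PySem.Str.isIn "Admin2" f then some f else s.2.2))

def fix_inconsistent_levels_alt (fields : List String) : List (Option String) :=
  let s := fields.foldl pvStepB (none, none, none)
  -- Python B raises ValueError if the Country or State slot is still None
  -- (outside Pre_); otherwise assembles the list:
  [s.1, s.2.1, s.2.2]

-- ===== PRECONDITION & SPEC =====
-- Pre_ excludes exactly the inputs where A raises ValueError: no field
-- containing "Country", or none containing "State" (B raises there too).
def Pre_fix_inconsistent_levels (fields : List String) : Prop :=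
  (fields.any (fun f => PySem.Str.isIn "Country" f)) = true ∧
  (fields.any (fun f => PySem.Str.isIn "State" f)) = true
instance (fields : List String) : Decidable (Pre_fix_inconsistent_levels fields) := by
  unfold Pre_fix_inconsistent_levels; infer_instance

def pvWitness_fix_inconsistent_levels : List String :=
  ["Country_Region", "Province_State", "Admin2"]

def Spec_fix_inconsistent_levels (fields : List String) (out : List (Option String)) : Prop :=
  out = fix_inconsistent_levels_alt fields
instance (fields : List String) (out : List (Option String)) :
    Decidable (Spec_fix_inconsistent_levels fields out) := by
  unfold Spec_fix_inconsistent_levels; infer_instance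

-- ===== CLAIM (what is proved, stated in full; the proofs are below) =====
def Claim_equal_fix_inconsistent_levels : Prop :=
  ∀ (fields : List String), Dom_fix_inconsistent_levels fields →
    Pre_fix_inconsistent_levels fields →
    Spec_fix_inconsistent_levels fields (fix_inconsistent_levels fields)

-- ===== LEMMAS AND PROOFS =====
-- one slot of B's fold, viewed alone
def pvFillOne (kw : String) (fields : List String) (a : Option String) : Option String :=
  fields.foldl (fun s f => if s.isNone && PySem.Str.isIn kw f then some f else s) a

lemma foldB_eq (fields : List String) (a b c : Option String) :
    fields.foldl pvStepB (a, b, c) =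
      (pvFillOne "Country" fields a, pvFillOne "State" fields b, pvFillOne "Admin2" fields c) := by
  induction fields generalizing a b c with
  | nil => rfl
  | cons f rest ih =>
      simp only [List.foldl_cons, pvStepB, pvFillOne] at *
      exact ih _ _ _

lemma fillOne_some (kw x : String) (fields : List String) :
    pvFillOne kw fields (some x) = some x := by
  induction fields with
  | nil => rfl
  | cons f rest ih =>
      simp only [pvFillOne, List.foldl_cons, Option.isNone_some, Bool.false_and,
        Bool.false_eq_true, if_false] at *
      exact ih

lemma fillOne_none (kw : String) (fields : List String) :
    pvFillOne kw fields none = pvScanA kw fields := by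
  induction fields with
  | nil => rfl
  | cons f rest ih =>
      simp only [pvFillOne, List.foldl_cons, Option.isNone_none, Bool.true_and]
      cases h : PySem.Str.isIn kw f with
      | false =>
          simp only [Bool.false_eq_true, if_false]
          rw [show List.foldl (fun s f => if s.isNone && PySem.Str.isIn kw f then some f else s)
              none rest = pvFillOne kw rest none from rfl, ih]
          simp only [pvScanA, h, Bool.false_eq_true, if_false]
      | true =>
          simp only [reduceIte]
          rw [show List.foldl (fun s f => if s.isNone && PySem.Str.isIn kw f then some f else s)
              (some f) rest = pvFillOne kw rest (some f) from rfl, fillOne_some]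
          simp only [pvScanA, h, reduceIte]

-- ===== VERDICT (by name: the statement is the Claim_ definition above) =====
theorem fix_inconsistent_levels_spec : Claim_equal_fix_inconsistent_levels := by
  intro fields _ _
  show fix_inconsistent_levels fields = fix_inconsistent_levels_alt fields
  simp [fix_inconsistent_levels, fix_inconsistent_levels_alt, foldB_eq, fillOne_none]
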